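-- pv_equiv track=rewrite | github.com/yanqiue/apps | archive/appv2.py | row_contains_all
-- ===== SOURCE A (Python) =====
-- from typing import List, Tuple, Dict, Any, Optional
--
-- def normalize_cell(s: Optional[str]) -> str:
--     if s is None:
--         return ""
--     return str(s).strip()
--
-- def row_contains_all(row: List[str], required: List[str], case_insensitive=True, substring=False) -> bool:
--     cells = [normalize_cell(c) for c in row]
--     if case_insensitive:
--         cells_lookup = [c.lower() for c in cells]
--         req = [r.lower() for r in required]
--     else:
--         cells_lookup = cells
--         req = required
--
--     for token in req:
--         if substring:
--             if not any(token in c for c in cells_lookup):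
--                 return False
--         else:
--             if token not in cells_lookup:
--                 return False
--     return True
-- ===== SOURCE B (Python) =====
-- def row_contains_all(row, required, case_insensitive=True, substring=False):
--     def norm(s):
--         return "" if s is None else str(s).strip()
--     cells = [norm(c) for c in row]
--     if case_insensitive:
--         cells = [c.lower() for c in cells]
--         remaining = {r.lower() for r in required}
--     else:
--         remaining = set(required)
--     for c in cells:
--         if not remaining:
--             break
--         if substring:
--             remaining = {t for t in remaining if t not in c}
--         else:
--             remaining.discard(c)
--     return not remaining
-- ===== Notes on version B (the rewrite author's own statement) =====
-- stated objective: alternative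
-- what changed: Inverts the loop nesting: instead of scanning all cells once per required token, B makes a single pass over the cells with a shrinking set of outstanding tokens (discard on exact match, filter on substring match) and returns whether the set is empty, breaking early once it is.
import Mathlib
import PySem

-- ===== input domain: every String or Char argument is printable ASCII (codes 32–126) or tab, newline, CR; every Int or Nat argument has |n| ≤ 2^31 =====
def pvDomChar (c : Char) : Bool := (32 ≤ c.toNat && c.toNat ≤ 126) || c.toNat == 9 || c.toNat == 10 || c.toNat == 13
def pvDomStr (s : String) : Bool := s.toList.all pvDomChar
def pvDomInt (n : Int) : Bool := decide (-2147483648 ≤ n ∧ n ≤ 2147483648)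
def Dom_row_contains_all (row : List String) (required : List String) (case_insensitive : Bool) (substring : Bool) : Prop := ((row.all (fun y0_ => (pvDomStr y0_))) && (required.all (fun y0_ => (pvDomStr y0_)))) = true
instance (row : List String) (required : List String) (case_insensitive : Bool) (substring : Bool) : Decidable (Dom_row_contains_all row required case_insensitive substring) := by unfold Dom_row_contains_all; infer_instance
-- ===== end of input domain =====

-- B makes a single pass over the cells with a shrinking set of outstanding tokens, instead of
-- A's scan of all cells once per token (objective: alternative decomposition).

-- ===== PORT A =====
-- the 'for token in req' loop of A, with its two early 'return False' branches
def rcaLoopA (req : List String) (cells : List String) (substring : Bool) : Bool :=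
  match req with
  | [] => true
  | token :: ts =>
    if substring then
      if !(cells.any (fun c => PySem.Str.isIn token c)) then false
      else rcaLoopA ts cells substring
    else
      if !(cells.contains token) then false
      else rcaLoopA ts cells substring

def row_contains_all (row : List String) (required : List String) (case_insensitive : Bool) (substring : Bool) : Bool :=
  let cells := row.map (fun c => PySem.Str.strip c)
  let cellsLookup := if case_insensitive then cells.map PySem.Str.lower else cells
  let req := if case_insensitive then required.map PySem.Str.lower else required
  rcaLoopA req cellsLookup substring

-- ===== PORT B =====
-- B's 'for c in cells' loop over the shrinking set of outstanding tokens, with the early break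
def rcaLoopB (cells : List String) (remaining : PySem.Set String) (substring : Bool) : PySem.Set String :=
  match cells with
  | [] => remaining
  | c :: cs =>
    if remaining = [] then remaining
    else
      rcaLoopB cs
        (if substring then remaining.filter (fun t => !(PySem.Str.isIn t c))
         else PySem.Set.discard remaining c) substring

def row_contains_all_alt (row : List String) (required : List String) (case_insensitive : Bool) (substring : Bool) : Bool :=
  let cells0 := row.map (fun c => PySem.Str.strip c)
  let cells := if case_insensitive then cells0.map PySem.Str.lower else cells0
  let remaining := if case_insensitive then PySem.Set.ofList (required.map PySem.Str.lower)
                   else PySem.Set.ofList required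
  rcaLoopB cells remaining substring = []

-- ===== PRECONDITION & SPEC =====
def Spec_row_contains_all (row : List String) (required : List String) (case_insensitive : Bool) (substring : Bool) (out : Bool) : Prop := out = row_contains_all_alt row required case_insensitive substring
instance (row : List String) (required : List String) (case_insensitive : Bool) (substring : Bool) (out : Bool) : Decidable (Spec_row_contains_all row required case_insensitive substring out) := by unfold Spec_row_contains_all; infer_instance

-- ===== CLAIM (what is proved, stated in full; the proofs are below) =====
def Claim_equal_row_contains_all : Prop := ∀ (row : List String) (required : List String) (case_insensitive : Bool) (substring : Bool), Dom_row_contains_all row required case_insensitive substring → Spec_row_contains_all row required case_insensitive substring (row_contains_all row required case_insensitive substring)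

-- ===== LEMMAS AND PROOFS =====

-- 'token is found among cells' in the relevant mode
def rcaFound (cells : List String) (substring : Bool) (t : String) : Bool :=
  if substring then cells.any (fun c => PySem.Str.isIn t c) else cells.contains t

theorem rcaLoopA_eq_all (req cells : List String) (sub : Bool) :
    rcaLoopA req cells sub = req.all (rcaFound cells sub) := by
  induction req with
  | nil => rfl
  | cons t ts ih =>
    cases sub
    · cases h : cells.contains t <;> simp [rcaLoopA, rcaFound, h, ih]
    · rw [rcaLoopA, if_pos rfl]
      cases h : cells.any (fun c => PySem.Str.isIn t c)
      · simp at h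
        simp [rcaFound]
        intro x hx hix
        exact absurd hix (by simp [h x hx])
      · simp at h
        simp [rcaFound, ih, h]

theorem rcaLoopB_empty_iff (cells : List String) (rem : PySem.Set String) (sub : Bool) :
    rcaLoopB cells rem sub = [] ↔ ∀ t ∈ rem, rcaFound cells sub t = true := by
  induction cells generalizing rem with
  | nil =>
    rw [rcaLoopB]
    constructor
    · rintro rfl; simp
    · intro h
      cases rem with
      | nil => rfl
      | cons t ts =>
        have := h t (by simp)
        cases sub <;> simp [rcaFound] at this
  | cons c cs ih =>
    by_cases hrem : rem = ([] : List String)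
    · subst hrem; simp [rcaLoopB]
    · rw [rcaLoopB, if_neg hrem, ih]
      cases sub
      · rw [if_neg (by simp)]
        constructor
        · intro h t ht
          by_cases hc : t = c
          · simp [rcaFound, hc]
          · have ht' : t ∈ PySem.Set.discard rem c := by
              rw [PySem.Set.mem_discard]; exact ⟨ht, hc⟩
            have := h t ht'
            simp [rcaFound] at this ⊢
            tauto
        · intro h t ht
          rw [PySem.Set.mem_discard] at ht
          have := h t ht.1
          simp [rcaFound] at this ⊢
          rcases this with h' | h'
          · exact absurd h' ht.2
          · exact h'
      · rw [if_pos rfl]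
        constructor
        · intro h t ht
          by_cases hc : PySem.Chars.isIn t.toList c.toList = true
          · simp [rcaFound, hc]
          · have ht' : t ∈ List.filter (fun t => !PySem.Str.isIn t c) rem := by
              simp [List.mem_filter, ht]
              simpa using hc
            have := h t ht'
            simp [rcaFound] at this ⊢
            exact Or.inr this
        · intro h t ht
          rw [List.mem_filter] at ht
          have := h t ht.1
          have hni : PySem.Chars.isIn t.toList c.toList = false := by
            have h2 := ht.2; simpa using h2
          simp [rcaFound] at this ⊢
          rcases this with h' | h'
          · rw [hni] at h'; exact absurd h' (by simp)
          · exact h'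

-- ===== VERDICT (by name: the statement is the Claim_ definition above) =====
theorem row_contains_all_spec : Claim_equal_row_contains_all := by
  intro row required ci sub _
  unfold Spec_row_contains_all row_contains_all row_contains_all_alt
  cases ci <;>
  · simp only [Bool.false_eq_true, if_true, if_false]
    rw [rcaLoopA_eq_all, Bool.eq_iff_iff, decide_eq_true_iff, rcaLoopB_empty_iff,
      List.all_eq_true]
    constructor
    · intro h t ht; exact h t ((PySem.Set.mem_ofList _ _).mp ht)
    · intro h t ht; exact h t ((PySem.Set.mem_ofList _ _).mpr ht)
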